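-- pv_equiv track=rewrite | github.com/bae1022/Coding-Test | Programmers/부족한 금액 계산하기.py | solution
-- ===== SOURCE A (Python) =====
-- def solution(price, money, count):
--     answer = -1
--
--     pay = 0
--     for i in range(1, count + 1):
--         pay += (price * (i))
--
--     if money >= pay:
--         answer = 0
--
--     else:
--         answer = -(money - pay)
--
--     return answer
-- ===== SOURCE B (Python) =====
-- def solution(price, money, count):
--     total = price * count * (count + 1) // 2 if count > 0 else 0
--     return max(total - money, 0)
-- ===== Notes on version B (the rewrite author's own statement) =====
-- stated objective: faster
-- what changed: replaces the O(count) summation loop with the arithmetic-series closed form price*count*(count+1)//2 and a max() instead of the if/else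
import Mathlib
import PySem

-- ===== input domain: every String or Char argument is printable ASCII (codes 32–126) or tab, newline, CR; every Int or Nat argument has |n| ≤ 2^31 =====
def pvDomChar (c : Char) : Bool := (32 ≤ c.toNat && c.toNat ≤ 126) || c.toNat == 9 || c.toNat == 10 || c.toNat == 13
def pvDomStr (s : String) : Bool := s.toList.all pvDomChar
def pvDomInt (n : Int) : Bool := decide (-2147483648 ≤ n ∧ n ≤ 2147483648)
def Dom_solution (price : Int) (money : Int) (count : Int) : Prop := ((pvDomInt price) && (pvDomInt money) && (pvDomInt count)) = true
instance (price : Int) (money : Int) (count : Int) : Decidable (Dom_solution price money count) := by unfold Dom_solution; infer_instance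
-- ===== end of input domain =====

-- B replaces A's O(count) summation loop by the closed form price*count*(count+1)//2 (faster, asymptotic).

-- ===== PORT A =====
def solution (price : Int) (money : Int) (count : Int) : Int :=
  let pay := (PySem.List.pyRange 1 (count + 1) 1).foldl (fun pay i => pay + price * i) 0
  if money ≥ pay then 0 else -(money - pay)

-- ===== PORT B =====
def solution_alt (price : Int) (money : Int) (count : Int) : Int :=
  let total := if count > 0 then PySem.Int.floordiv (price * count * (count + 1)) 2 else 0
  max (total - money) 0

-- ===== PRECONDITION & SPEC =====
def Spec_solution (price : Int) (money : Int) (count : Int) (out : Int) : Prop := out = solution_alt price money count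
instance (price : Int) (money : Int) (count : Int) (out : Int) : Decidable (Spec_solution price money count out) := by unfold Spec_solution; infer_instance

-- ===== CLAIM (what is proved, stated in full; the proofs are below) =====
def Claim_equal_solution : Prop := ∀ (price : Int) (money : Int) (count : Int), Dom_solution price money count → Spec_solution price money count (solution price money count)

-- ===== LEMMAS AND PROOFS =====

lemma pay_twice (price : Int) (n : Nat) :
    2 * ((List.range n).foldl (fun (pay : Int) (k : Nat) => pay + price * (1 + (k : Int))) 0) = price * n * (n + 1) := by
  induction n with
  | zero => simp
  | succ m ih =>
    rw [List.range_succ, List.foldl_append]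
    simp only [List.foldl_cons, List.foldl_nil]
    push_cast
    ring_nf
    ring_nf at ih
    linarith

lemma pay_closed (price : Int) (count : Int) (h : 0 < count) :
    (PySem.List.pyRange 1 (count + 1) 1).foldl (fun pay i => pay + price * i) 0 =
      price * count * (count + 1) / 2 := by
  rw [PySem.List.pyRange_one, List.foldl_map]
  have hn : ((count + 1 - 1).toNat : Int) = count := by omega
  have h2 := pay_twice price (count + 1 - 1).toNat
  rw [hn] at h2
  set pay := (List.range (count + 1 - 1).toNat).foldl (fun (pay : Int) (k : Nat) => pay + price * (1 + (k : Int))) 0 with hpay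
  set S := price * count * (count + 1) with hS
  omega

-- ===== VERDICT (by name: the statement is the Claim_ definition above) =====
theorem solution_spec : Claim_equal_solution := by
  intro price money count _
  unfold Spec_solution solution solution_alt
  by_cases h : 0 < count
  · rw [pay_closed price count h]
    rw [PySem.Int.floordiv_eq_ediv_of_pos (by norm_num)]
    simp only [if_pos h]
    omega
  · have : PySem.List.pyRange 1 (count + 1) 1 = [] := by
      rw [PySem.List.pyRange_one]
      simp only [List.map_eq_nil_iff, List.range_eq_nil, Int.toNat_eq_zero]
      omega
    rw [this]
    simp only [List.foldl_nil, if_neg h]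
    omega
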